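-- pv_equiv track=rewrite | github.com/glbter/kpi-computing | comp_discrete_math/sets.py | BitIntersection
-- ===== SOURCE A (Python) =====
-- def BitRepr(Set, univ):
--     res = []
--     for elem in univ:
--         if elem in Set:
--             res.append(1)
--         else:
--             res.append(0)
--     return res
--
-- def BitIntersection (arr1, arr2, univ):
--     Set = BitRepr(arr1, univ)
--     Set2 = BitRepr(arr2, univ)
--     res = []
--     for i in range(0, len(univ)):
--         if (Set[i] == 1) and (Set2[i] == 1):
--             res.append(1)
--         else:
--             res.append(0)
--     return res
-- ===== SOURCE B (Python) =====
-- def BitIntersection(arr1, arr2, univ):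
--     res = []
--     for elem in univ:
--         res.append(1 if (elem in arr1 and elem in arr2) else 0)
--     return res
-- ===== Notes on version B (the rewrite author's own statement) =====
-- stated objective: simpler
-- what changed: B is a single direct membership scan over univ appending 1 iff the element is in both lists, eliminating A's two materialized bitvector tables (BitRepr) and the separate index-based combining pass.
import Mathlib
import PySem

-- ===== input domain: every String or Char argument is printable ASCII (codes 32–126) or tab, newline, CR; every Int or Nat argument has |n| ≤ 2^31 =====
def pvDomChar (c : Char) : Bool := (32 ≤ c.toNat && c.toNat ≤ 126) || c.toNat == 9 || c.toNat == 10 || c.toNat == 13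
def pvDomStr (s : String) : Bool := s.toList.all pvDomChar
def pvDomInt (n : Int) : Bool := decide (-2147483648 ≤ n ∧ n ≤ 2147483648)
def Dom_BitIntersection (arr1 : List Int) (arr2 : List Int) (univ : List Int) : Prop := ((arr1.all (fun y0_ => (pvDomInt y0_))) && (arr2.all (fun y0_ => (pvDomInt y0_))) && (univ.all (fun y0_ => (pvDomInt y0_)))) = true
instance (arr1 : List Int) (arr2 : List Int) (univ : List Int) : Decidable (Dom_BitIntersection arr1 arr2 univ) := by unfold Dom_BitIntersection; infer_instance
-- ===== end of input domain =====

-- B replaces A's build-two-bitvector-tables-then-index-combine with a single direct membership scan over univ (objective: simpler).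


-- ===== PORT A =====
-- helper BitRepr: for elem in univ: append 1 if elem in Set else 0
def bitRepr (S : List Int) (univ : List Int) : List Int :=
  univ.foldl (fun res elem => if S.contains elem then res ++ [1] else res ++ [0]) []

-- Set[i]/Set2[i]: i ranges over range(0, len(univ)) and both tables have length len(univ),
-- so the index is always in range; pyGetD with a default is exact here (the default is never read).
def BitIntersection (arr1 : List Int) (arr2 : List Int) (univ : List Int) : List Int :=
  let S := bitRepr arr1 univ
  let S2 := bitRepr arr2 univ
  (PySem.List.pyRange 0 (univ.length : Int) 1).foldl
    (fun res i =>
      if PySem.List.pyGetD S i 0 == 1 && PySem.List.pyGetD S2 i 0 == 1 then res ++ [1]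
      else res ++ [0]) []

-- ===== PORT B =====
def BitIntersection_alt (arr1 : List Int) (arr2 : List Int) (univ : List Int) : List Int :=
  univ.foldl (fun res elem => res ++ [if arr1.contains elem && arr2.contains elem then 1 else 0]) []

-- ===== PRECONDITION & SPEC =====
def Spec_BitIntersection (arr1 : List Int) (arr2 : List Int) (univ : List Int) (out : List Int) : Prop := out = BitIntersection_alt arr1 arr2 univ
instance (arr1 : List Int) (arr2 : List Int) (univ : List Int) (out : List Int) : Decidable (Spec_BitIntersection arr1 arr2 univ out) := by unfold Spec_BitIntersection; infer_instance

-- ===== CLAIM (what is proved, stated in full; the proofs are below) =====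
def Claim_equal_BitIntersection : Prop := ∀ (arr1 : List Int) (arr2 : List Int) (univ : List Int), Dom_BitIntersection arr1 arr2 univ → Spec_BitIntersection arr1 arr2 univ (BitIntersection arr1 arr2 univ)

-- ===== LEMMAS AND PROOFS =====

-- A's table equals the per-element map
theorem bitRepr_eq_map (S univ : List Int) :
    bitRepr S univ = univ.map (fun e => if S.contains e then (1 : Int) else 0) := by
  unfold bitRepr
  have h : (fun (res : List Int) (elem : Int) =>
      if S.contains elem then res ++ [(1 : Int)] else res ++ [0])
      = fun res elem => res ++ [if S.contains elem then (1 : Int) else 0] := by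
    funext res elem; split <;> simp_all
  rw [h, PySem.List.foldl_append_singleton_eq_map, List.nil_append]

theorem BitIntersection_eq_map (arr1 arr2 univ : List Int) :
    BitIntersection arr1 arr2 univ
      = univ.map (fun e => if arr1.contains e && arr2.contains e then (1 : Int) else 0) := by
  unfold BitIntersection
  simp only [bitRepr_eq_map]
  have h : (fun (res : List Int) (i : Int) =>
      if PySem.List.pyGetD (univ.map (fun e => if arr1.contains e then (1 : Int) else 0)) i 0 == 1
        && PySem.List.pyGetD (univ.map (fun e => if arr2.contains e then (1 : Int) else 0)) i 0 == 1
      then res ++ [(1 : Int)] else res ++ [0])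
      = fun res i => res ++
          [if PySem.List.pyGetD (univ.map (fun e => if arr1.contains e then (1 : Int) else 0)) i 0 == 1
            && PySem.List.pyGetD (univ.map (fun e => if arr2.contains e then (1 : Int) else 0)) i 0 == 1
           then (1 : Int) else 0] := by
    funext res i; split <;> simp_all
  rw [h, PySem.List.foldl_append_singleton_eq_map]
  apply List.ext_getElem
  · simp [PySem.List.length_pyRange_one]
  · intro k hk hk'
    have hku : k < univ.length := by
      simpa [PySem.List.length_pyRange_one] using hk
    simp only [List.nil_append, List.getElem_map]
    rw [PySem.List.getElem_pyRange_one]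
    simp only [zero_add, PySem.List.pyGetD_natCast]
    rw [List.getD_eq_getElem _ _ (by simpa using hku), List.getD_eq_getElem _ _ (by simpa using hku)]
    simp only [List.getElem_map]
    by_cases h1 : arr1.contains univ[k] <;> by_cases h2 : arr2.contains univ[k] <;> simp_all

-- ===== VERDICT (by name: the statement is the Claim_ definition above) =====
theorem BitIntersection_spec : Claim_equal_BitIntersection := by
  intro arr1 arr2 univ _
  unfold Spec_BitIntersection BitIntersection_alt
  rw [PySem.List.foldl_append_singleton_eq_map, BitIntersection_eq_map]
  rfl
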